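-- pv_equiv track=rewrite | github.com/imrysn/kmti-main | admin/components/data_managers.py | _calculate_counts_from_files
-- ===== SOURCE A (Python) =====
-- from typing import Dict, List, Optional
--
-- def _calculate_counts_from_files(files: List[Dict]) -> Dict[str, int]:
--     """Calculate statistics from a specific list of files."""
--     counts = {
--         'pending': 0,
--         'approved': 0,
--         'rejected': 0,
--         'total': len(files)
--     }
--
--     for file_data in files:
--         status = file_data.get('status', '').lower()
--         if status in ['pending_team_leader', 'pending_admin', 'pending']:
--             counts['pending'] += 1
--         elif status in ['approved', 'approved_by_admin']:
--             counts['approved'] += 1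
--         elif status in ['rejected_team_leader', 'rejected_admin', 'rejected']:
--             counts['rejected'] += 1
--
--     return counts
-- ===== SOURCE B (Python) =====
-- from typing import Dict, List, Optional
--
-- def _calculate_counts_from_files(files: List[Dict]) -> Dict[str, int]:
--     """Calculate statistics from a specific list of files."""
--     statuses = [file_data.get('status', '').lower() for file_data in files]
--     return {
--         'pending': (statuses.count('pending_team_leader')
--                     + statuses.count('pending_admin')
--                     + statuses.count('pending')),
--         'approved': statuses.count('approved') + statuses.count('approved_by_admin'),
--         'rejected': (statuses.count('rejected_team_leader')
--                      + statuses.count('rejected_admin')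
--                      + statuses.count('rejected')),
--         'total': len(files),
--     }
-- ===== Notes on version B (the rewrite author's own statement) =====
-- stated objective: alternative
-- what changed: Replaces the single accumulator loop with branch chains by a two-phase decomposition: extract the lowercased statuses once, then build the result dict in one fixed-shape step by summing per-status counts for each category.
import Mathlib
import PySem

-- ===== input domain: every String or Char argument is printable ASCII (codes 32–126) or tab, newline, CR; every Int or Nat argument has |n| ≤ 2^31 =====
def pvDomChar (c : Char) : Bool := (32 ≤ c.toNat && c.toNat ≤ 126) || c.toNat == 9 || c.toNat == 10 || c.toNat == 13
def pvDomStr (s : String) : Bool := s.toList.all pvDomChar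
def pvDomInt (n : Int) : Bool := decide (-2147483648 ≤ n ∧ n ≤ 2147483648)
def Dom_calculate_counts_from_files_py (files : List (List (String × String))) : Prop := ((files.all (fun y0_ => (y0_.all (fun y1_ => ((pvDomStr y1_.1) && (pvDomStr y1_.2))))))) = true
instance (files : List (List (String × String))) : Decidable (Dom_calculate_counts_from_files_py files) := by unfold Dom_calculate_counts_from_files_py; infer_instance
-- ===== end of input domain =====

-- B: two-phase alternative — extract lowercased statuses once, then build the result dict by summing per-status counts (proved equal to A's accumulator loop).


-- ===== PORT A =====
def calculate_counts_from_files_py (files : List (List (String × String))) : List (String × Int) :=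
  let counts : PySem.Dict String Int :=
    ((((PySem.Dict.empty.insert "pending" 0).insert "approved" 0).insert "rejected" 0).insert
      "total" (files.length : Int))
  let counts := files.foldl (fun counts file_data =>
    let status := PySem.Str.lower ((PySem.Dict.mk file_data).getD "status" "")
    if status ∈ ["pending_team_leader", "pending_admin", "pending"] then
      counts.modify "pending" 0 (· + 1)
    else if status ∈ ["approved", "approved_by_admin"] then
      counts.modify "approved" 0 (· + 1)
    else if status ∈ ["rejected_team_leader", "rejected_admin", "rejected"] then
      counts.modify "rejected" 0 (· + 1)
    else counts) counts
  counts.items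

-- ===== PORT B =====
def calculate_counts_from_files_py_alt (files : List (List (String × String))) : List (String × Int) :=
  let statuses := files.map (fun file_data =>
    PySem.Str.lower ((PySem.Dict.mk file_data).getD "status" ""))
  [("pending", (statuses.count "pending_team_leader" : Int)
      + (statuses.count "pending_admin" : Int) + (statuses.count "pending" : Int)),
   ("approved", (statuses.count "approved" : Int) + (statuses.count "approved_by_admin" : Int)),
   ("rejected", (statuses.count "rejected_team_leader" : Int)
      + (statuses.count "rejected_admin" : Int) + (statuses.count "rejected" : Int)),
   ("total", (files.length : Int))]

-- ===== PRECONDITION & SPEC =====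
def Spec_calculate_counts_from_files_py (files : List (List (String × String))) (out : List (String × Int)) : Prop := out = calculate_counts_from_files_py_alt files
instance (files : List (List (String × String))) (out : List (String × Int)) : Decidable (Spec_calculate_counts_from_files_py files out) := by unfold Spec_calculate_counts_from_files_py; infer_instance

-- ===== CLAIM (what is proved, stated in full; the proofs are below) =====
def Claim_equal_calculate_counts_from_files_py : Prop := ∀ (files : List (List (String × String))), Dom_calculate_counts_from_files_py files → Spec_calculate_counts_from_files_py files (calculate_counts_from_files_py files)

-- ===== LEMMAS AND PROOFS =====

-- The status extracted from one file entry.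
def pvStatus (file_data : List (String × String)) : String :=
  PySem.Str.lower ((PySem.Dict.mk file_data).getD "status" "")

-- A's loop on the four-entry dict, with the accumulator generalized.
theorem pvLoop_char (files : List (List (String × String))) (p a r t : Int) :
    files.foldl (fun counts file_data =>
      let status := pvStatus file_data
      if status ∈ ["pending_team_leader", "pending_admin", "pending"] then
        counts.modify "pending" 0 (· + 1)
      else if status ∈ ["approved", "approved_by_admin"] then
        counts.modify "approved" 0 (· + 1)
      else if status ∈ ["rejected_team_leader", "rejected_admin", "rejected"] then
        counts.modify "rejected" 0 (· + 1)
      else counts)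
      (PySem.Dict.mk [("pending", p), ("approved", a), ("rejected", r), ("total", t)])
    = (let statuses := files.map pvStatus
       PySem.Dict.mk
        [("pending", p + (statuses.count "pending_team_leader" : Int)
            + (statuses.count "pending_admin" : Int) + (statuses.count "pending" : Int)),
         ("approved", a + (statuses.count "approved" : Int)
            + (statuses.count "approved_by_admin" : Int)),
         ("rejected", r + (statuses.count "rejected_team_leader" : Int)
            + (statuses.count "rejected_admin" : Int) + (statuses.count "rejected" : Int)),
         ("total", t)]) := by
  induction files generalizing p a r t with
  | nil => simp
  | cons f fs ih =>
    simp only [List.foldl_cons, List.map_cons]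
    have hmodP : (PySem.Dict.mk [("pending", p), ("approved", a), ("rejected", r), ("total", t)]).modify "pending" 0 (· + 1)
        = PySem.Dict.mk [("pending", p + 1), ("approved", a), ("rejected", r), ("total", t)] := by
      simp [PySem.Dict.modify, PySem.Dict.contains, PySem.Dict.getD, PySem.Dict.get?, PySem.Dict.insert]
    have hmodA : (PySem.Dict.mk [("pending", p), ("approved", a), ("rejected", r), ("total", t)]).modify "approved" 0 (· + 1)
        = PySem.Dict.mk [("pending", p), ("approved", a + 1), ("rejected", r), ("total", t)] := by
      simp [PySem.Dict.modify, PySem.Dict.contains, PySem.Dict.getD, PySem.Dict.get?, PySem.Dict.insert]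
    have hmodR : (PySem.Dict.mk [("pending", p), ("approved", a), ("rejected", r), ("total", t)]).modify "rejected" 0 (· + 1)
        = PySem.Dict.mk [("pending", p), ("approved", a), ("rejected", r + 1), ("total", t)] := by
      simp [PySem.Dict.modify, PySem.Dict.contains, PySem.Dict.getD, PySem.Dict.get?, PySem.Dict.insert]
    by_cases h1 : pvStatus f ∈ ["pending_team_leader", "pending_admin", "pending"]
    · rw [if_pos h1, hmodP, ih]
      simp only [List.mem_cons, List.not_mem_nil, or_false] at h1
      rcases h1 with h | h | h <;>
        simp [List.count_cons, h] <;> push_cast <;> ring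
    · rw [if_neg h1]
      by_cases h2 : pvStatus f ∈ ["approved", "approved_by_admin"]
      · rw [if_pos h2, hmodA, ih]
        simp only [List.mem_cons, List.not_mem_nil, or_false] at h2
        rcases h2 with h | h <;>
          simp [List.count_cons, h] <;> push_cast <;> ring
      · rw [if_neg h2]
        by_cases h3 : pvStatus f ∈ ["rejected_team_leader", "rejected_admin", "rejected"]
        · rw [if_pos h3, hmodR, ih]
          simp only [List.mem_cons, List.not_mem_nil, or_false] at h3
          rcases h3 with h | h | h <;>
            simp [List.count_cons, h] <;> push_cast <;> ring
        · rw [if_neg h3, ih]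
          simp only [List.mem_cons, List.not_mem_nil, or_false, not_or] at h1 h2 h3
          simp [List.count_cons, h1.1, h1.2.1, h1.2.2, h2.1, h2.2, h3.1, h3.2.1, h3.2.2,
            Ne.symm h1.1, Ne.symm h1.2.1, Ne.symm h1.2.2, Ne.symm h2.1, Ne.symm h2.2,
            Ne.symm h3.1, Ne.symm h3.2.1, Ne.symm h3.2.2]

-- ===== VERDICT (by name: the statement is the Claim_ definition above) =====
theorem calculate_counts_from_files_py_spec : Claim_equal_calculate_counts_from_files_py := by
  intro files _
  unfold Spec_calculate_counts_from_files_py calculate_counts_from_files_py calculate_counts_from_files_py_alt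
  have h0 : (((PySem.Dict.empty.insert "pending" (0:Int)).insert "approved" 0).insert "rejected" 0).insert
      "total" (files.length : Int)
      = PySem.Dict.mk [("pending", 0), ("approved", 0), ("rejected", 0), ("total", (files.length : Int))] := by
    simp [PySem.Dict.empty, PySem.Dict.insert, PySem.Dict.contains, PySem.Dict.get?]
  simp only [h0]
  rw [show (fun (counts : PySem.Dict String Int) (file_data : List (String × String)) =>
      let status := PySem.Str.lower ((PySem.Dict.mk file_data).getD "status" "")
      if status ∈ ["pending_team_leader", "pending_admin", "pending"] then
        counts.modify "pending" 0 (· + 1)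
      else if status ∈ ["approved", "approved_by_admin"] then
        counts.modify "approved" 0 (· + 1)
      else if status ∈ ["rejected_team_leader", "rejected_admin", "rejected"] then
        counts.modify "rejected" 0 (· + 1)
      else counts) = (fun counts file_data =>
      let status := pvStatus file_data
      if status ∈ ["pending_team_leader", "pending_admin", "pending"] then
        counts.modify "pending" 0 (· + 1)
      else if status ∈ ["approved", "approved_by_admin"] then
        counts.modify "approved" 0 (· + 1)
      else if status ∈ ["rejected_team_leader", "rejected_admin", "rejected"] then
        counts.modify "rejected" 0 (· + 1)
      else counts) from rfl]
  rw [pvLoop_char]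
  simp only [zero_add]
  rfl
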